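-- pv_equiv track=rewrite | github.com/MrBrantCode/unitest_baseline | mut_generate/mist_train_cf/cf_95287/solution.py | find_longest_consecutive_subsequence
-- ===== SOURCE A (Python) =====
-- def find_longest_consecutive_subsequence(arr):
--     arr_set = set(arr)  # Convert array to set for faster lookup
--
--     max_length = 0
--     max_subsequence = []
--
--     for num in arr:
--         if num - 1 not in arr_set:  # Check if num is the start of a subsequence
--             current_length = 0
--             current_subsequence = []
--
--             while num in arr_set:  # Continue adding numbers to the subsequence
--                 current_length += 1
--                 current_subsequence.append(num)
--                 num += 1
--
--             if (current_length > max_length) and (len(current_subsequence) > 1) and (any(x % 2 == 0 for x in current_subsequence) and any(x % 2 != 0 for x in current_subsequence)):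
--                 max_length = current_length
--                 max_subsequence = current_subsequence
--
--     return max_length, max_subsequence
-- ===== SOURCE B (Python) =====
-- def find_longest_consecutive_subsequence(arr):
--     s = set(arr)
--     # DP table: length_from[x] = length of the consecutive run starting at x,
--     # filled in one pass over the distinct values in decreasing order.
--     length_from = {}
--     for x in sorted(s, reverse=True):
--         length_from[x] = length_from.get(x + 1, 0) + 1
--     best_len, best_run = 0, []
--     for num in arr:
--         if num - 1 in s:
--             continue
--         l = length_from.get(num, 0)
--         # a consecutive run of length > 1 always contains an even and an odd number
--         if l > 1 and l > best_len:
--             best_len, best_run = l, list(range(num, num + l))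
--     return best_len, best_run
-- ===== Notes on version B (the rewrite author's own statement) =====
-- stated objective: alternative
-- what changed: Replaces the inner while-loop walk of each run by a dictionary of run lengths built with one descending pass over the sorted distinct values, drops the parity test (a consecutive run of length > 1 provably contains both an even and an odd number), and materialises the winning run with range() instead of appending element by element.
import Mathlib
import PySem

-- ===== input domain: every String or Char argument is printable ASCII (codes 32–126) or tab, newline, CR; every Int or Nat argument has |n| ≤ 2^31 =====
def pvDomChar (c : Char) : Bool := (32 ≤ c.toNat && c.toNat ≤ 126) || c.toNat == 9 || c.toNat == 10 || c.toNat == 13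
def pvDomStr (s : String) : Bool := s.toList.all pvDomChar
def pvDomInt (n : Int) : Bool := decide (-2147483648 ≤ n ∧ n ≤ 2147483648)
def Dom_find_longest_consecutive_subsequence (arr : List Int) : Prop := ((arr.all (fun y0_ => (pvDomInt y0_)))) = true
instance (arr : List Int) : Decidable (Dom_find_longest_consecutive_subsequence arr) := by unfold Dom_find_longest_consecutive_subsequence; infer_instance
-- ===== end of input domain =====

-- B replaces A's inner while-loop run walk by a run-length dictionary built in one
-- descending pass over the sorted distinct values, drops the parity test (a consecutive
-- run of length > 1 always contains an even and an odd number, proved below) and builds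
-- the winning run with range(); objective: alternative.

-- ===== PORT A =====
-- A's 'while num in arr_set' loop; the fuel |arr_set| + 1 only makes it total (a run of
-- distinct set members takes at most |arr_set| successful steps, see pv_chain_le below)
def pvRunAux (s : List Int) : Nat → Int → Int → List Int → Int × List Int
  | 0, _, len, acc => (len, acc)
  | f + 1, num, len, acc =>
      if PySem.Set.contains s num then pvRunAux s f (num + 1) (len + 1) (acc ++ [num])
      else (len, acc)

def find_longest_consecutive_subsequence (arr : List Int) : Int × List Int :=
  let arr_set : PySem.Set Int := PySem.Set.ofList arr
  arr.foldl (fun (st : Int × List Int) num =>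
    if !PySem.Set.contains arr_set (num - 1) then
      let cl_cs := pvRunAux arr_set (arr_set.length + 1) num 0 []
      if cl_cs.1 > st.1 ∧ cl_cs.2.length > 1 ∧
          (cl_cs.2.any fun x => PySem.Int.mod x 2 == 0) ∧
          (cl_cs.2.any fun x => PySem.Int.mod x 2 != 0)
      then cl_cs else st
    else st) (0, [])

-- ===== PORT B =====
def find_longest_consecutive_subsequence_alt (arr : List Int) : Int × List Int :=
  let s : PySem.Set Int := PySem.Set.ofList arr
  let length_from : PySem.Dict Int Int :=
    (PySem.List.sorted s (fun x => x) true).foldl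
      (fun d x => d.insert x (d.getD (x + 1) 0 + 1)) PySem.Dict.empty
  arr.foldl (fun (st : Int × List Int) num =>
    if PySem.Set.contains s (num - 1) then st
    else
      let l := length_from.getD num 0
      if l > 1 ∧ l > st.1 then (l, PySem.List.pyRange num (num + l) 1) else st) (0, [])

-- ===== PRECONDITION & SPEC =====
def Spec_find_longest_consecutive_subsequence (arr : List Int) (out : Int × List Int) : Prop := out = find_longest_consecutive_subsequence_alt arr
instance (arr : List Int) (out : Int × List Int) : Decidable (Spec_find_longest_consecutive_subsequence arr out) := by unfold Spec_find_longest_consecutive_subsequence; infer_instance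

-- ===== CLAIM (what is proved, stated in full; the proofs are below) =====
def Claim_equal_find_longest_consecutive_subsequence : Prop := ∀ (arr : List Int), Dom_find_longest_consecutive_subsequence arr → Spec_find_longest_consecutive_subsequence arr (find_longest_consecutive_subsequence arr)

-- ===== LEMMAS AND PROOFS =====

-- length of the consecutive run starting at x inside s, with fuel
def pvChain (s : List Int) : Nat → Int → Nat
  | 0, _ => 0
  | f + 1, x => if x ∈ s then pvChain s f (x + 1) + 1 else 0

theorem pv_filter_ge_mono (t : List Int) (x : Int) :
    (t.filter (fun y => decide (x + 1 ≤ y))).length ≤ (t.filter (fun y => decide (x ≤ y))).length := by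
  apply List.Sublist.length_le
  apply List.monotone_filter_right
  intro a ha
  simp at ha ⊢; omega

theorem pv_filter_succ_lt (s : List Int) (x : Int) (hn : s.Nodup) (hx : x ∈ s) :
    (s.filter (fun y => decide (x + 1 ≤ y))).length < (s.filter (fun y => decide (x ≤ y))).length := by
  induction s with
  | nil => simp at hx
  | cons a t ih =>
    rw [List.nodup_cons] at hn
    simp only [List.filter_cons]
    by_cases hax : x = a
    · subst hax
      rw [if_neg (by simp), if_pos (by simp)]
      simpa using Nat.lt_succ_of_le (pv_filter_ge_mono t x)
    · have hx' : x ∈ t := by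
        rcases List.mem_cons.mp hx with h | h
        · exact absurd h hax
        · exact h
      have := ih hn.2 hx'
      by_cases hc : x ≤ a
      · rw [if_pos (by simpa using (by omega : x + 1 ≤ a)), if_pos (by simpa using hc)]
        simpa using this
      · rw [if_neg (by simp; omega), if_neg (by simpa using hc)]
        exact this

theorem pv_chain_le (s : List Int) (hn : s.Nodup) :
    ∀ (f : Nat) (x : Int), pvChain s f x ≤ (s.filter (fun y => decide (x ≤ y))).length := by
  intro f
  induction f with
  | zero => intro x; simp [pvChain]
  | succ f ih =>
    intro x
    by_cases hx : x ∈ s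
    · have h1 := pv_filter_succ_lt s x hn hx
      have h2 := ih (x + 1)
      simp only [pvChain, if_pos hx]
      omega
    · simp [pvChain, hx]

theorem pv_chain_succ (s : List Int) (hn : s.Nodup) :
    ∀ (f : Nat) (x : Int), (s.filter (fun y => decide (x ≤ y))).length ≤ f →
      pvChain s (f + 1) x = pvChain s f x := by
  intro f
  induction f with
  | zero =>
    intro x h
    by_cases hx : x ∈ s
    · exact absurd (Nat.le_zero.mp h) (by
        have := pv_filter_succ_lt s x hn hx; omega)
    · simp [pvChain, hx]
  | succ f ih =>
    intro x h
    by_cases hx : x ∈ s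
    · have h1 := pv_filter_succ_lt s x hn hx
      have e1 : pvChain s (f + 1 + 1) x = pvChain s (f + 1) (x + 1) + 1 := by
        rw [pvChain, if_pos hx]
      have e2 : pvChain s (f + 1) x = pvChain s f (x + 1) + 1 := by
        rw [pvChain, if_pos hx]
      rw [e1, e2, ih (x + 1) (by omega)]
    · simp [pvChain, hx]

theorem pv_chain_step (s : List Int) (hn : s.Nodup) (x : Int) (hx : x ∈ s) :
    pvChain s (s.length + 1) x = pvChain s (s.length + 1) (x + 1) + 1 := by
  have h1 : pvChain s (s.length + 1) x = pvChain s s.length (x + 1) + 1 := by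
    simp [pvChain, hx]
  have h2 := pv_chain_succ s hn s.length (x + 1) (List.length_filter_le _ _)
  omega

theorem pv_runAux_eq (s : List Int) :
    ∀ (f : Nat) (x len : Int) (acc : List Int), pvChain s f x < f →
      pvRunAux s f x len acc
        = (len + (pvChain s f x : Int), acc ++ PySem.List.pyRange x (x + (pvChain s f x : Int)) 1) := by
  intro f
  induction f with
  | zero => intro x len acc h; omega
  | succ f ih =>
    intro x len acc h
    by_cases hx : x ∈ s
    · have hc : PySem.Set.contains s x = true := by simp [PySem.Set.contains, hx]
      have e1 : pvChain s (f + 1) x = pvChain s f (x + 1) + 1 := by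
        rw [pvChain, if_pos hx]
      rw [e1] at h ⊢
      have hlt : pvChain s f (x + 1) < f := by omega
      rw [pvRunAux, if_pos hc, ih (x + 1) (len + 1) (acc ++ [x]) hlt]
      have harith : x + ((pvChain s f (x + 1) : Int) + 1) = x + 1 + (pvChain s f (x + 1) : Int) := by ring
      have hp : PySem.List.pyRange x (x + ((pvChain s f (x + 1) : Int) + 1)) 1
          = x :: PySem.List.pyRange (x + 1) (x + 1 + (pvChain s f (x + 1) : Int)) 1 := by
        rw [PySem.List.pyRange_one_cons (by omega), harith]
      simp only [Prod.mk.injEq]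
      refine ⟨by push_cast; ring, ?_⟩
      push_cast
      rw [hp]
      simp
    · have hc : ¬ (PySem.Set.contains s x = true) := by
        simp [PySem.Set.contains, hx]
      have e1 : pvChain s (f + 1) x = 0 := by
        rw [pvChain, if_neg hx]
      rw [pvRunAux, if_neg hc, e1]
      simp

theorem pv_dict_fold (s : List Int) (hn : s.Nodup) :
    ∀ (l : List Int) (d : PySem.Dict Int Int),
      l.Pairwise (· > ·) → (∀ y ∈ l, y ∈ s) →
      (∀ x : Int, d.getD x 0 = if x ∈ s ∧ x ∉ l then (pvChain s (s.length + 1) x : Int) else 0) →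
      ∀ x : Int, (l.foldl (fun d x => d.insert x (d.getD (x + 1) 0 + 1)) d).getD x 0
        = if x ∈ s then (pvChain s (s.length + 1) x : Int) else 0 := by
  intro l
  induction l with
  | nil =>
    intro d _ _ hinv x
    simpa using hinv x
  | cons a t ih =>
    intro d hp hmem hinv x
    have hpt : t.Pairwise (· > ·) := hp.tail
    have hat : ∀ y ∈ t, y < a := by
      intro y hy; exact List.rel_of_pairwise_cons hp hy
    have has : a ∈ s := hmem a (by simp)
    rw [List.foldl_cons]
    refine ih (d.insert a (d.getD (a + 1) 0 + 1)) hpt (fun y hy => hmem y (by simp [hy])) ?_ x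
    intro z
    by_cases hza : z = a
    · subst hza
      rw [PySem.Dict.getD_insert_self]
      have hz1 : (z + 1) ∉ (z :: t) := by
        intro h
        rcases List.mem_cons.mp h with h | h
        · omega
        · have := hat _ h; omega
      have hz2 : z ∉ t := fun h => by have := hat _ h; omega
      rw [hinv (z + 1)]
      have hstep := pv_chain_step s hn z has
      by_cases hs1 : z + 1 ∈ s
      · rw [if_pos ⟨hs1, hz1⟩, if_pos ⟨has, hz2⟩]
        push_cast [hstep]; ring
      · have hz0 : pvChain s (s.length + 1) (z + 1) = 0 := by
          rw [pvChain, if_neg hs1]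
        rw [if_neg (by tauto), if_pos ⟨has, hz2⟩]
        rw [hstep, hz0]
        norm_num
    · rw [PySem.Dict.getD_insert_of_ne _ _ _ hza, hinv z]
      by_cases hzs : z ∈ s
      · by_cases hzt : z ∈ t
        · rw [if_neg (by simp [hzt]), if_neg (by tauto)]
        · rw [if_pos ⟨hzs, by simp [hza, hzt]⟩, if_pos ⟨hzs, hzt⟩]
      · rw [if_neg (by tauto), if_neg (by tauto)]

theorem pv_parity_even (x : Int) (k : Int) (hk : 1 < k) :
    (PySem.List.pyRange x (x + k) 1).any (fun y => PySem.Int.mod y 2 == 0) = true := by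
  rw [List.any_eq_true]
  by_cases h : 2 ∣ x
  · exact ⟨x, PySem.List.mem_pyRange_one.mpr ⟨le_refl x, by omega⟩,
      by simpa using (PySem.Int.mod_eq_zero_iff_dvd x 2).mpr h⟩
  · exact ⟨x + 1, PySem.List.mem_pyRange_one.mpr ⟨by omega, by omega⟩,
      by simpa using (PySem.Int.mod_eq_zero_iff_dvd (x + 1) 2).mpr (by omega)⟩

theorem pv_parity_odd (x : Int) (k : Int) (hk : 1 < k) :
    (PySem.List.pyRange x (x + k) 1).any (fun y => PySem.Int.mod y 2 != 0) = true := by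
  rw [List.any_eq_true]
  by_cases h : 2 ∣ x
  · refine ⟨x + 1, PySem.List.mem_pyRange_one.mpr ⟨by omega, by omega⟩, ?_⟩
    have : ¬ (PySem.Int.mod (x + 1) 2 = 0) := fun hc =>
      (by omega : ¬ (2 ∣ x + 1)) ((PySem.Int.mod_eq_zero_iff_dvd (x + 1) 2).mp hc)
    simpa using this
  · refine ⟨x, PySem.List.mem_pyRange_one.mpr ⟨le_refl x, by omega⟩, ?_⟩
    have : ¬ (PySem.Int.mod x 2 = 0) := fun hc =>
      h ((PySem.Int.mod_eq_zero_iff_dvd x 2).mp hc)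
    simpa using this

theorem pv_main (arr : List Int) :
    find_longest_consecutive_subsequence arr = find_longest_consecutive_subsequence_alt arr := by
  unfold find_longest_consecutive_subsequence find_longest_consecutive_subsequence_alt
  set s : PySem.Set Int := PySem.Set.ofList arr with hs
  have hn : s.Nodup := PySem.Set.nodup_ofList arr
  have hsorted := PySem.List.sorted_pairwise_rev s (fun x => x)
  have hnd : (PySem.List.sorted s (fun x => x) true).Nodup :=
    (PySem.List.sorted_perm s (fun x => x) true).nodup_iff.mpr hn
  have hgt : (PySem.List.sorted s (fun x => x) true).Pairwise (· > ·) := by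
    have := List.Pairwise.and hsorted hnd
    exact this.imp (fun h => lt_of_le_of_ne h.1 (Ne.symm h.2))
  have hd : ∀ x : Int,
      ((PySem.List.sorted s (fun x => x) true).foldl
        (fun d x => d.insert x (d.getD (x + 1) 0 + 1)) PySem.Dict.empty).getD x 0
      = if x ∈ s then (pvChain s (s.length + 1) x : Int) else 0 := by
    apply pv_dict_fold s hn _ _ hgt
    · intro y hy; exact (PySem.List.mem_sorted s (fun x => x) true y).mp hy
    · intro x
      rw [if_neg]
      · simp [PySem.Dict.empty, PySem.Dict.getD, PySem.Dict.get?]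
      · rintro ⟨hxs, hxl⟩
        exact hxl ((PySem.List.mem_sorted s (fun x => x) true x).mpr hxs)
  apply PySem.List.foldl_congr_mem
  intro st num hnum
  have hnums : num ∈ s := (PySem.Set.mem_ofList arr num).mpr hnum
  by_cases hm : (num - 1) ∈ s
  · have hc1 : PySem.Set.contains s (num - 1) = true := by simp [PySem.Set.contains, hm]
    rw [hc1]
    rw [if_neg (show ¬ ((!true) = true) by simp), if_pos (show true = true from rfl)]
  · have hc1 : PySem.Set.contains s (num - 1) = false := by simp [PySem.Set.contains, hm]
    have hlt : pvChain s (s.length + 1) num < s.length + 1 := by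
      have h1 := pv_chain_le s hn (s.length + 1) num
      have h2 := List.length_filter_le (fun y => decide (num ≤ y)) s
      omega
    set c : Nat := pvChain s (s.length + 1) num with hc
    have hrun : pvRunAux s (s.length + 1) num 0 []
        = ((c : Int), PySem.List.pyRange num (num + (c : Int)) 1) := by
      rw [pv_runAux_eq s (s.length + 1) num 0 [] hlt]
      simp only [List.nil_append, zero_add, Prod.mk.injEq]
      exact ⟨by rw [hc], by rw [hc]⟩
    have hgetD : ((PySem.List.sorted s (fun x => x) true).foldl
        (fun d x => d.insert x (d.getD (x + 1) 0 + 1)) PySem.Dict.empty).getD num 0 = (c : Int) := by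
      rw [hd num, if_pos hnums]
    have hlen : (PySem.List.pyRange num (num + (c : Int)) 1).length = c := by
      rw [PySem.List.length_pyRange_one]; omega
    rw [hc1]
    rw [if_pos (show (!false) = true by simp), if_neg (show ¬ (false = true) by simp)]
    simp only [hrun, hgetD]
    split_ifs with h1 h2 h2
    · rfl
    · exact absurd ⟨by rw [hlen] at h1; exact_mod_cast (by omega : (1:Int) < (c:Int)) , h1.1⟩ h2
    · refine absurd ⟨h2.2, ?_, pv_parity_even num (c : Int) h2.1, pv_parity_odd num (c : Int) h2.1⟩ h1
      rw [hlen]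
      omega
    · rfl

-- ===== VERDICT (by name: the statement is the Claim_ definition above) =====
theorem find_longest_consecutive_subsequence_spec : Claim_equal_find_longest_consecutive_subsequence := by
  intro arr _
  unfold Spec_find_longest_consecutive_subsequence
  exact pv_main arr
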